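-- pv_equiv track=rewrite | github.com/ChaimaBenmakhlouf/sapin-project | index.py | get_current_base
-- ===== SOURCE A (Python) =====
-- def get_current_base(dimension):
--
--     i = 0
--     base = 7
--     spacesToRemove = 0
--     lines = 4
--     while i < dimension-1:
--         if (i % 2) == 0:
--             spacesToRemove += 2
--         base = (base - spacesToRemove) + ((lines+i) * 2)
--         i += 1
--
--     return base
-- ===== SOURCE B (Python) =====
-- def get_current_base(dimension):
--     # closed form: base = 7 + sum_{i=0}^{n-1} (i + i%2 + 6) with n = dimension-1
--     n = dimension - 1
--     if n <= 0:
--         return 7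
--     return 7 + n * (n - 1) // 2 + n // 2 + 6 * n
-- ===== Notes on version B (the rewrite author's own statement) =====
-- stated objective: faster
-- what changed: Replaced the O(n) while-loop recurrence by a closed-form arithmetic-series formula evaluated in O(1).
import Mathlib
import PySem

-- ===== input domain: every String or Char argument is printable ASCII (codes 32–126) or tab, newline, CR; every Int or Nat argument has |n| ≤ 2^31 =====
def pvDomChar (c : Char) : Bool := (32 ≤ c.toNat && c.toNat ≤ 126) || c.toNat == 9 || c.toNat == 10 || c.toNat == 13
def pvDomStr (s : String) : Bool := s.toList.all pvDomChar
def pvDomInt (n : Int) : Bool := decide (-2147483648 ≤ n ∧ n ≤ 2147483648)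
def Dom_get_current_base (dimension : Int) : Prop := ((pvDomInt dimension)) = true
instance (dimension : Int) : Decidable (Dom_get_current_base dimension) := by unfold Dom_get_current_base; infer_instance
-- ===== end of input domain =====

-- B replaces A's O(n) while-loop recurrence by a closed-form arithmetic-series formula (O(1)).


-- ===== PORT A =====
-- the while loop; fuel = number of iterations (i counts 0,1,… up to dimension-2)
def getBaseLoop (fuel : Nat) (i base spacesToRemove : Int) : Int :=
  match fuel with
  | 0 => base
  | fuel + 1 =>
    let s := if PySem.Int.mod i 2 = 0 then spacesToRemove + 2 else spacesToRemove
    getBaseLoop fuel (i + 1) ((base - s) + ((4 + i) * 2)) s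

def get_current_base (dimension : Int) : Int :=
  getBaseLoop (dimension - 1).toNat 0 7 0

-- ===== PORT B =====
def get_current_base_alt (dimension : Int) : Int :=
  let n := dimension - 1
  if n ≤ 0 then 7
  else 7 + PySem.Int.floordiv (n * (n - 1)) 2 + PySem.Int.floordiv n 2 + 6 * n

-- ===== PRECONDITION & SPEC =====
def Spec_get_current_base (dimension : Int) (out : Int) : Prop := out = get_current_base_alt dimension
instance (dimension : Int) (out : Int) : Decidable (Spec_get_current_base dimension out) := by unfold Spec_get_current_base; infer_instance

-- ===== CLAIM (what is proved, stated in full; the proofs are below) =====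
def Claim_equal_get_current_base : Prop := ∀ (dimension : Int), Dom_get_current_base dimension → Spec_get_current_base dimension (get_current_base dimension)

-- ===== LEMMAS AND PROOFS =====

-- partial sums of the per-iteration increment i + i%2 + 6
def pvT : Nat → Int
  | 0 => 0
  | n + 1 => pvT n + ((n : Int) + (n : Int) % 2 + 6)

-- loop invariant: with s = i + i%2 at entry, the loop adds pvT (m+k) - pvT m to base
theorem getBaseLoop_eq (k : Nat) : ∀ (m : Nat) (b : Int),
    getBaseLoop k (m : Int) b ((m : Int) + (m : Int) % 2) = b + (pvT (m + k) - pvT m) := by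
  induction k with
  | zero => intro m b; simp [getBaseLoop]
  | succ k ih =>
    intro m b
    have hmod : PySem.Int.mod (m : Int) 2 = (m : Int) % 2 :=
      PySem.Int.mod_eq_emod_of_pos (by norm_num)
    have hc : ((m + 1 : Nat) : Int) = (m : Int) + 1 := by push_cast; ring
    have hki : m + (k + 1) = m + 1 + k := by omega
    rcases Nat.even_or_odd m with h | h
    · have h2 : (m : Int) % 2 = 0 := by
        rcases h with ⟨t, ht⟩; subst ht; push_cast; omega
      have h1 : ((m : Int) + 1) % 2 = 1 := by omega
      have step := ih (m + 1) (b - ((m : Int) + 0 + 2) + (4 + (m : Int)) * 2)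
      rw [hc, h1] at step
      simp only [getBaseLoop, hmod, h2, if_true]
      rw [show (m : Int) + 0 + 2 = (m : Int) + 1 + 1 from by ring] at step ⊢
      rw [step, hki]
      simp only [pvT, h2]
      omega
    · have h2 : (m : Int) % 2 = 1 := by
        rcases h with ⟨t, ht⟩; subst ht; push_cast; omega
      have h1 : ((m : Int) + 1) % 2 = 0 := by omega
      have hne : ¬ ((m : Int) % 2 = 0) := by omega
      have step := ih (m + 1) (b - ((m : Int) + 1 + 0) + (4 + (m : Int)) * 2)
      rw [hc, h1] at step
      simp only [getBaseLoop, hmod, if_neg hne]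
      rw [show (m : Int) + (m : Int) % 2 = (m : Int) + 1 + 0 from by omega]
      rw [step, hki]
      simp only [pvT, h2]
      omega

-- closed form for the partial sums
theorem pvT_closed (n : Nat) : pvT n = ((n : Int) * ((n : Int) - 1)) / 2 + (n : Int) / 2 + 6 * (n : Int) := by
  induction n with
  | zero => simp [pvT]
  | succ n ih =>
    simp only [pvT, ih]
    push_cast
    have ha : ((n : Int) + 1) * ((n : Int) + 1 - 1) = (n : Int) * ((n : Int) - 1) + 2 * (n : Int) := by ring
    rw [ha]
    generalize (n : Int) * ((n : Int) - 1) = a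
    omega

-- the loop from its actual initial state
theorem getBaseLoop_from_zero (k : Nat) : getBaseLoop k 0 7 0 = 7 + pvT k := by
  have h := getBaseLoop_eq k 0 7
  norm_num [pvT] at h
  exact h

-- ===== VERDICT (by name: the statement is the Claim_ definition above) =====
theorem get_current_base_spec : Claim_equal_get_current_base := by
  intro d _
  unfold Spec_get_current_base get_current_base get_current_base_alt
  rw [getBaseLoop_from_zero]
  by_cases h : d - 1 ≤ 0
  · have : (d - 1).toNat = 0 := by omega
    simp [this, pvT, h]
  · have hn : ((d - 1).toNat : Int) = d - 1 := by omega
    rw [pvT_closed, hn]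
    rw [if_neg h]
    rw [PySem.Int.floordiv_eq_ediv_of_pos (by norm_num), PySem.Int.floordiv_eq_ediv_of_pos (by norm_num)]
    ring_nf
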